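-- pv_equiv track=rewrite | github.com/choudoufu520/sky-autoplay | src/application/converter.py | _fuzzy_position_lookup
-- ===== SOURCE A (Python) =====
-- from bisect import bisect_left
--
-- _POSITION_TIME_TOLERANCE_MS = 30
--
-- PositionIndex = dict[int, list[tuple[int, int]]]
--
-- def _fuzzy_position_lookup(
--     index: PositionIndex,
--     time_ms: int,
--     note: int,
--     tolerance: int = _POSITION_TIME_TOLERANCE_MS,
-- ) -> int | None:
--     """Find the replacement for *note* at the closest time within *tolerance*."""
--     entries = index.get(note)
--     if not entries:
--         return None
--     times = [e[0] for e in entries]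
--     i = bisect_left(times, time_ms)
--     best_dist = tolerance + 1
--     best_repl: int | None = None
--     for candidate_idx in (i - 1, i):
--         if 0 <= candidate_idx < len(entries):
--             t, repl = entries[candidate_idx]
--             dist = abs(t - time_ms)
--             if dist < best_dist:
--                 best_dist = dist
--                 best_repl = repl
--     return best_repl
-- ===== SOURCE B (Python) =====
-- _POSITION_TIME_TOLERANCE_MS = 30
--
--
-- def _fuzzy_position_lookup(index, time_ms, note, tolerance=_POSITION_TIME_TOLERANCE_MS):
--     """Single linear pass over the note's entries keeping the best in-tolerance
--     match; on equal distance the entry on the earlier-time side wins (relies on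
--     the index invariant that each entry list is sorted by time)."""
--     entries = index.get(note)
--     if not entries:
--         return None
--     best_dist = None
--     best_repl = None
--     for t, repl in entries:
--         dist = abs(t - time_ms)
--         if dist <= tolerance and (
--             best_dist is None or dist < best_dist or (dist == best_dist and t < time_ms)
--         ):
--             best_dist = dist
--             best_repl = repl
--     return best_repl
-- ===== Notes on version B (the rewrite author's own statement) =====
-- stated objective: simpler
-- what changed: B replaces A's times-list build + bisect_left + two-neighbour fold with a single linear pass over the entries keeping a running best within tolerance (ties prefer the earlier-time side), correct because on a time-sorted entry list the global nearest in-tolerance entry with that tie rule is exactly A's neighbour pick.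
-- outside the precondition, e.g. on _fuzzy_position_lookup({0: [(10, 1), (0, 2)]}, 0, 0, 5): A returns None, B returns 2
import Mathlib
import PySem

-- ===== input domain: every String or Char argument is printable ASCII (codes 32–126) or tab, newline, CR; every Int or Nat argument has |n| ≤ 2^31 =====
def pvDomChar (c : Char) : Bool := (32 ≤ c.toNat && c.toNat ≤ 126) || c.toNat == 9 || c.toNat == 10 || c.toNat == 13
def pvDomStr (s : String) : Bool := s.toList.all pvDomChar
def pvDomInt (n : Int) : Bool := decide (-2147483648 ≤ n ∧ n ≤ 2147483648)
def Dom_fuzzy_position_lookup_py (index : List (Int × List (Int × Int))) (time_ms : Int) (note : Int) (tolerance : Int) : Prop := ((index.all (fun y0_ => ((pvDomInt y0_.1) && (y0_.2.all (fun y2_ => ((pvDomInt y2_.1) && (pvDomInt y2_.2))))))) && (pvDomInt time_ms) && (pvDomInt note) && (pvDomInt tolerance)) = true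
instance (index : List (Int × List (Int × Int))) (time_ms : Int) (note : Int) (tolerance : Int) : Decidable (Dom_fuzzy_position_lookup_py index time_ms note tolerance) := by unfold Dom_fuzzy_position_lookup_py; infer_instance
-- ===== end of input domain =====

-- B replaces the times-list build + bisect + neighbour pick with one linear pass keeping a
-- running best within tolerance (ties prefer the earlier-time side); simpler, same cost.

-- ===== PORT A =====
def fuzzy_position_lookup_py (index : List (Int × List (Int × Int))) (time_ms : Int) (note : Int) (tolerance : Int) : Option Int :=
  match (PySem.Dict.ofList index).get? note with
  | none => none
  | some entries =>
    if entries = [] then none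
    else
      let times := entries.map (fun e => e.1)
      let i : Nat := PySem.List.bisectLeft times time_ms
      let st := [(i : Int) - 1, (i : Int)].foldl
        (fun (st : Int × Option Int) idx =>
          if 0 ≤ idx ∧ idx < (entries.length : Int) then
            let p := PySem.List.pyGetD entries idx (0, 0)
            let dist := |p.1 - time_ms|
            if dist < st.1 then (dist, some p.2) else st
          else st) (tolerance + 1, none)
      st.2

-- ===== PORT B =====
-- the body of Source B's for-loop, as a named step function for the fold
def pvStepB (time_ms tolerance : Int) (st : Option Int × Option Int) (p : Int × Int) : Option Int × Option Int :=
  let dist := |p.1 - time_ms|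
  let take := decide (dist ≤ tolerance) &&
    (match st.1 with
     | none => true
     | some bd => decide (dist < bd) || (decide (dist = bd) && decide (p.1 < time_ms)))
  if take then (some dist, some p.2) else st

def fuzzy_position_lookup_py_alt (index : List (Int × List (Int × Int))) (time_ms : Int) (note : Int) (tolerance : Int) : Option Int :=
  match (PySem.Dict.ofList index).get? note with
  | none => none
  | some entries =>
    if entries = [] then none
    else (entries.foldl (pvStepB time_ms tolerance) (none, none)).2

-- ===== PRECONDITION & SPEC =====
-- Pre_ excludes inputs whose entry list for the looked-up note is not sorted by time: there
-- bisect_left's result is meaningless, so A's value is an artefact of where the binary search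
-- happens to land, while B returns the nearest in-tolerance entry.
def Pre_fuzzy_position_lookup_py (index : List (Int × List (Int × Int))) (time_ms : Int) (note : Int) (tolerance : Int) : Prop :=
  ∀ es, (PySem.Dict.ofList index).get? note = some es → es.Pairwise (fun a b => a.1 ≤ b.1)
instance (index : List (Int × List (Int × Int))) (time_ms : Int) (note : Int) (tolerance : Int) : Decidable (Pre_fuzzy_position_lookup_py index time_ms note tolerance) := by unfold Pre_fuzzy_position_lookup_py; infer_instance

def pvWitness_fuzzy_position_lookup_py : (List (Int × List (Int × Int))) × Int × Int × Int :=
  ([(60, [(100, 1), (130, 2), (200, 3)])], 125, 60, 30)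

def Spec_fuzzy_position_lookup_py (index : List (Int × List (Int × Int))) (time_ms : Int) (note : Int) (tolerance : Int) (out : Option Int) : Prop := out = fuzzy_position_lookup_py_alt index time_ms note tolerance
instance (index : List (Int × List (Int × Int))) (time_ms : Int) (note : Int) (tolerance : Int) (out : Option Int) : Decidable (Spec_fuzzy_position_lookup_py index time_ms note tolerance out) := by unfold Spec_fuzzy_position_lookup_py; infer_instance

-- ===== CLAIM =====
def Claim_equal_fuzzy_position_lookup_py : Prop := ∀ (index : List (Int × List (Int × Int))) (time_ms : Int) (note : Int) (tolerance : Int), Dom_fuzzy_position_lookup_py index time_ms note tolerance → Pre_fuzzy_position_lookup_py index time_ms note tolerance → Spec_fuzzy_position_lookup_py index time_ms note tolerance (fuzzy_position_lookup_py index time_ms note tolerance)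

-- ===== LEMMAS AND PROOFS =====

theorem pv_getLast?_cons {α : Type} (p : α) (L : List α) (h : L ≠ []) :
    (p :: L).getLast? = L.getLast? := by
  cases L with
  | nil => exact absurd rfl h
  | cons b l => exact List.getLast?_cons_cons ..

-- If no element of R can fire the step against state st, the fold leaves st unchanged.
theorem pv_fold_const (x tol : Int) (R : List (Int × Int)) (st : Option Int × Option Int)
    (h : ∀ p ∈ R, pvStepB x tol st p = st) :
    R.foldl (pvStepB x tol) st = st := by
  induction R with
  | nil => rfl
  | cons p R ih =>
    simp only [List.foldl_cons, h p (List.mem_cons_self ..)]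
    exact ih (fun q hq => h q (List.mem_cons_of_mem _ hq))

-- Left part: all times < x, sorted ⇒ the fold ends on the last element (if within tolerance).
theorem pv_fold_left (x tol : Int) :
    ∀ (L : List (Int × Int)) (st : Option Int × Option Int),
    (∀ p ∈ L, p.1 < x) → L.Pairwise (fun a b => a.1 ≤ b.1) →
    (∀ d, st.1 = some d → ∀ p ∈ L, |p.1 - x| ≤ d) →
    L.foldl (pvStepB x tol) st =
      (match L.getLast? with
       | none => st
       | some q => if |q.1 - x| ≤ tol then (some |q.1 - x|, some q.2) else st) := by
  intro L
  induction L with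
  | nil => intro st _ _ _; rfl
  | cons p L ih =>
    intro st hlt hpw hinv
    have hplt : p.1 < x := hlt p (List.mem_cons_self ..)
    have hple : ∀ q ∈ L, |q.1 - x| ≤ |p.1 - x| := by
      intro q hq
      have h1 : p.1 ≤ q.1 := (List.pairwise_cons.mp hpw).1 q hq
      have h2 : q.1 < x := hlt q (List.mem_cons_of_mem _ hq)
      rw [abs_of_neg (by omega), abs_of_neg (by omega)]; omega
    simp only [List.foldl_cons]
    by_cases htol : |p.1 - x| ≤ tol
    · -- p fires
      have hstep : pvStepB x tol st p = (some |p.1 - x|, some p.2) := by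
        unfold pvStepB
        cases hst : st.1 with
        | none => simp [htol]
        | some d =>
          have hle := hinv d hst p (List.mem_cons_self ..)
          simp only [hst]
          have hcond : (decide (|p.1 - x| ≤ tol) &&
              (decide (|p.1 - x| < d) || (decide (|p.1 - x| = d) && decide (p.1 < x)))) = true := by
            simp only [Bool.and_eq_true, Bool.or_eq_true, decide_eq_true_eq]
            refine ⟨htol, ?_⟩
            rcases lt_or_eq_of_le hle with h | h
            · exact Or.inl h
            · exact Or.inr ⟨h, hplt⟩
          simp [hcond]
      rw [hstep, ih _ (fun q hq => hlt q (List.mem_cons_of_mem _ hq))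
            (List.pairwise_cons.mp hpw).2
            (by intro d hd q hq; simp at hd; rw [← hd]; exact hple q hq)]
      cases hL : L.getLast? with
      | none =>
        have : L = [] := List.getLast?_eq_none_iff.mp hL
        simp [this, htol]
      | some q =>
        have hqL : q ∈ L := List.mem_of_getLast? hL
        have hqtol : |q.1 - x| ≤ tol := le_trans (hple q hqL) htol
        have hLne : L ≠ [] := by intro h; simp [h] at hL
        have : (p :: L).getLast? = some q := by rw [pv_getLast?_cons _ _ hLne, hL]
        simp only [this, hqtol, if_pos]
    · -- p does not fire (distance above tolerance)
      have hstep : pvStepB x tol st p = st := by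
        unfold pvStepB; simp [htol]
      rw [hstep, ih _ (fun q hq => hlt q (List.mem_cons_of_mem _ hq))
            (List.pairwise_cons.mp hpw).2
            (fun d hd q hq => hinv d hd q (List.mem_cons_of_mem _ hq))]
      cases hL : L.getLast? with
      | none =>
        have : L = [] := List.getLast?_eq_none_iff.mp hL
        simp [this, htol]
      | some q =>
        have hLne : L ≠ [] := by intro h; simp [h] at hL
        have : (p :: L).getLast? = some q := by rw [pv_getLast?_cons _ _ hLne, hL]
        simp only [this]

-- Right part: all times ≥ x, sorted ⇒ only the head can change the state.
theorem pv_fold_right (x tol : Int) (R : List (Int × Int)) (st : Option Int × Option Int)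
    (hge : ∀ p ∈ R, x ≤ p.1) (hpw : R.Pairwise (fun a b => a.1 ≤ b.1)) :
    R.foldl (pvStepB x tol) st =
      (match R.head? with
       | none => st
       | some q => pvStepB x tol st q) := by
  cases R with
  | nil => rfl
  | cons q R =>
    simp only [List.foldl_cons, List.head?_cons]
    have hqge : x ≤ q.1 := hge q (List.mem_cons_self ..)
    have hRge : ∀ p ∈ R, |q.1 - x| ≤ |p.1 - x| := by
      intro p hp
      have h1 : q.1 ≤ p.1 := (List.pairwise_cons.mp hpw).1 p hp
      rw [abs_of_nonneg (by omega), abs_of_nonneg (by omega)]; omega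
    apply pv_fold_const
    intro p hp
    have hpge : x ≤ p.1 := hge p (List.mem_cons_of_mem _ hp)
    have hdle : |q.1 - x| ≤ |p.1 - x| := hRge p hp
    by_cases hfire : (decide (|q.1 - x| ≤ tol) &&
        (match st.1 with
         | none => true
         | some bd => decide (|q.1 - x| < bd) || (decide (|q.1 - x| = bd) && decide (q.1 < x)))) = true
    · -- q fired: new best distance is |q.1 - x|, no later element beats it
      have hq : pvStepB x tol st q = (some |q.1 - x|, some q.2) := by
        unfold pvStepB; simp [hfire]
      rw [hq]
      unfold pvStepB
      have hcond : (decide (|p.1 - x| ≤ tol) &&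
          (decide (|p.1 - x| < |q.1 - x|) || (decide (|p.1 - x| = |q.1 - x|) && decide (p.1 < x)))) = false := by
        simp only [Bool.and_eq_false_iff, Bool.or_eq_false_iff, Bool.and_eq_false_iff,
          decide_eq_false_iff_not]
        omega
      simp [hcond]
    · -- q did not fire: st unchanged, and p cannot fire either
      have hq : pvStepB x tol st q = st := by
        unfold pvStepB; simp only [Bool.not_eq_true] at hfire; simp [hfire]
      rw [hq]
      unfold pvStepB
      cases hst : st.1 with
      | none =>
        have hqt : ¬ |q.1 - x| ≤ tol := by
          intro h; exact hfire (by simp [hst, h])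
        have hpt : ¬ |p.1 - x| ≤ tol := by omega
        simp [hst, hpt]
      | some d =>
        have hnf : ¬ (|q.1 - x| ≤ tol ∧ (|q.1 - x| < d ∨ (|q.1 - x| = d ∧ q.1 < x))) := by
          intro ⟨h1, h2⟩
          apply hfire
          simp only [hst, Bool.and_eq_true, Bool.or_eq_true, decide_eq_true_eq]
          exact ⟨h1, h2⟩
        have hcond : (decide (|p.1 - x| ≤ tol) &&
            (decide (|p.1 - x| < d) || (decide (|p.1 - x| = d) && decide (p.1 < x)))) = false := by
          simp only [Bool.and_eq_false_iff, Bool.or_eq_false_iff, Bool.and_eq_false_iff,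
            decide_eq_false_iff_not]
          omega
        simp [hst, hcond]

-- ===== VERDICT =====
theorem fuzzy_position_lookup_py_spec : Claim_equal_fuzzy_position_lookup_py := by
  intro index x note tol _ hpre
  unfold Spec_fuzzy_position_lookup_py fuzzy_position_lookup_py fuzzy_position_lookup_py_alt
  cases hget : (PySem.Dict.ofList index).get? note with
  | none => rfl
  | some entries =>
    by_cases hne : entries = []
    · simp [hne]
    · simp only [if_neg hne]
      have hpw : entries.Pairwise (fun a b => a.1 ≤ b.1) := hpre entries hget
      have hpwt : (entries.map (fun e => e.1)).Pairwise (fun a b => a ≤ b) := by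
        exact List.pairwise_map.mpr hpw
      set i := PySem.List.bisectLeft (entries.map (fun e => e.1)) x with hi
      obtain ⟨hile, hlo, hhi⟩ := PySem.List.bisectLeft_spec (entries.map (fun e => e.1)) x hpwt
      simp only [List.length_map] at hile hlo hhi
      have hloE : ∀ j (hj : j < entries.length), j < i → entries[j].1 < x := by
        intro j hj hji
        have := hlo j (by simpa using hj) hji
        simpa using this
      have hhiE : ∀ j (hj : j < entries.length), i ≤ j → x ≤ entries[j].1 := by
        intro j hj hji
        have := hhi j (by simpa using hj) hji
        simpa using this
      -- split entries at i
      have hsplit : entries = entries.take i ++ entries.drop i := (List.take_append_drop i entries).symm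
      have hLlen : (entries.take i).length = i := by
        simp [List.length_take]; omega
      have hLlt : ∀ p ∈ entries.take i, p.1 < x := by
        intro p hp
        obtain ⟨j, hj, hjp⟩ := List.mem_iff_getElem.mp hp
        have hj' : j < i := by omega
        have : (entries.take i)[j] = entries[j]'(by omega) := List.getElem_take ..
        rw [this] at hjp
        exact hjp ▸ hloE j (by omega) hj'
      have hRge : ∀ p ∈ entries.drop i, x ≤ p.1 := by
        intro p hp
        obtain ⟨j, hj, hjp⟩ := List.mem_iff_getElem.mp hp
        have hlen : (entries.drop i).length = entries.length - i := by simp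
        have : (entries.drop i)[j] = entries[i + j]'(by omega) := List.getElem_drop ..
        rw [this] at hjp
        exact hjp ▸ hhiE (i + j) (by omega) (by omega)
      have hLpw : (entries.take i).Pairwise (fun a b => a.1 ≤ b.1) :=
        hpw.sublist (List.take_sublist ..)
      have hRpw : (entries.drop i).Pairwise (fun a b => a.1 ≤ b.1) :=
        hpw.sublist (List.drop_sublist ..)
      -- evaluate B's fold
      conv_rhs => rw [hsplit]
      rw [List.foldl_append,
          pv_fold_left x tol (entries.take i) (none, none) hLlt hLpw (by intro d hd; simp at hd),
          pv_fold_right x tol (entries.drop i) _ hRge hRpw]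
      -- head of the right part
      have hRhead : (entries.drop i).head? = entries[i]? := List.head?_drop ..
      -- evaluate A's two-candidate fold
      simp only [List.foldl_cons, List.foldl_nil]
      by_cases hiz : i = 0
      · -- no left candidate
        rw [hiz] at hRhead ⊢
        simp only [Nat.cast_zero]
        have hLnil : entries.take 0 = [] := rfl
        rw [if_neg (by omega : ¬ ((0:Int) ≤ (0:Int) - 1 ∧ (0:Int) - 1 < (entries.length : Int)))]
        have h0lt : 0 < entries.length := List.length_pos_iff.mpr hne
        rw [if_pos (by omega :
             (0:Int) ≤ (0:Int) ∧ (0:Int) < (entries.length : Int))]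
        have hg : PySem.List.pyGetD entries ((0:Nat) : Int) (0, 0) = entries.getD 0 (0, 0) :=
          PySem.List.pyGetD_natCast ..
        simp only [Nat.cast_zero] at hg
        rw [hg]
        have hq : entries.getD 0 (0, 0) = entries[0]'h0lt := by
          simp [List.getD_eq_getElem?_getD, List.getElem?_eq_getElem h0lt]
        have hhead : entries[(0:Nat)]? = some (entries[0]'h0lt) := List.getElem?_eq_getElem h0lt
        simp only [hLnil, List.getLast?_nil, hRhead, hhead, hq]
        unfold pvStepB
        by_cases ht : |(entries[0]'h0lt).1 - x| ≤ tol
        · rw [if_pos (by omega : |(entries[0]'h0lt).1 - x| < tol + 1)]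
          simp [ht]
        · rw [if_neg (by omega : ¬ |(entries[0]'h0lt).1 - x| < tol + 1)]
          simp [ht]
      · -- left candidate exists: q1 = entries[i-1]
        have hi1 : i - 1 < entries.length := by omega
        set q1 := entries[i-1]'hi1 with hq1
        have hLlast : (entries.take i).getLast? = some q1 := by
          have hLne : entries.take i ≠ [] := by
            intro h; have := congrArg List.length h; simp [hLlen] at this; omega
          rw [List.getLast?_eq_getElem? ]
          have : (entries.take i)[i-1]? = some ((entries.take i)[i-1]'(by omega)) :=
            List.getElem?_eq_getElem (by omega)
          rw [hLlen, this]
          congr 1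
          exact List.getElem_take ..
        have hc1 : ((i : Int) - 1) = ((i - 1 : Nat) : Int) := by push_cast; omega
        rw [if_pos (by omega :
             (0:Int) ≤ (i : Int) - 1 ∧ (i : Int) - 1 < (entries.length : Int))]
        rw [hc1]
        have hg1 : PySem.List.pyGetD entries ((i - 1 : Nat) : Int) (0, 0) = entries.getD (i-1) (0, 0) :=
          PySem.List.pyGetD_natCast ..
        rw [hg1]
        have hgd1 : entries.getD (i-1) (0, 0) = q1 := by
          simp [List.getD_eq_getElem?_getD, List.getElem?_eq_getElem hi1, hq1]
        rw [hgd1, hLlast]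
        by_cases hieq : i = entries.length
        · -- no right candidate
          rw [if_neg (by push_cast; omega : ¬ ((0:Int) ≤ (i : Int) ∧ (i : Int) < (entries.length : Int)))]
          have : entries[i]? = none := by rw [List.getElem?_eq_none_iff]; omega
          simp only [hRhead, this]
          by_cases ht : |q1.1 - x| ≤ tol
          · rw [if_pos (by omega : |q1.1 - x| < tol + 1)]; simp [ht]
          · rw [if_neg (by omega : ¬ |q1.1 - x| < tol + 1)]; simp [ht]
        · -- right candidate q2 = entries[i]
          have hi2 : i < entries.length := by omega
          set q2 := entries[i]'hi2 with hq2
          have hq2ge : x ≤ q2.1 := hhiE i hi2 (le_refl i)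
          rw [if_pos (by omega :
               (0:Int) ≤ (i : Int) ∧ (i : Int) < (entries.length : Int))]
          have hg2 : PySem.List.pyGetD entries ((i : Nat) : Int) (0, 0) = entries.getD i (0, 0) :=
            PySem.List.pyGetD_natCast ..
          rw [hg2]
          have hgd2 : entries.getD i (0, 0) = q2 := by
            simp [List.getD_eq_getElem?_getD, List.getElem?_eq_getElem hi2, hq2]
          rw [hgd2]
          have : entries[i]? = some q2 := List.getElem?_eq_getElem hi2
          simp only [hRhead, this]
          unfold pvStepB
          by_cases ht1 : |q1.1 - x| ≤ tol
          · rw [if_pos (by omega : |q1.1 - x| < tol + 1)]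
            simp only [if_pos ht1]
            by_cases ht2 : |q2.1 - x| < |q1.1 - x|
            · rw [if_pos ht2]
              have : |q2.1 - x| ≤ tol := by omega
              simp [this, ht2]
            · rw [if_neg ht2]
              have hcond : (decide (|q2.1 - x| ≤ tol) &&
                  (decide (|q2.1 - x| < |q1.1 - x|) ||
                   (decide (|q2.1 - x| = |q1.1 - x|) && decide (q2.1 < x)))) = false := by
                simp only [Bool.and_eq_false_iff, Bool.or_eq_false_iff, Bool.and_eq_false_iff,
                  decide_eq_false_iff_not]
                omega
              simp [hcond]
          · rw [if_neg (by omega : ¬ |q1.1 - x| < tol + 1)]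
            simp only [if_neg ht1]
            by_cases ht2 : |q2.1 - x| ≤ tol
            · rw [if_pos (by omega : |q2.1 - x| < tol + 1)]; simp [ht2]
            · rw [if_neg (by omega : ¬ |q2.1 - x| < tol + 1)]; simp [ht2]
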